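-- pv_equiv track=rewrite | github.com/azsgws/emgraph-test | graph/create_ranking_graph.py | rank_nodes_with_value
-- ===== SOURCE A (Python) =====
-- def rank_nodes_with_value(node2value):
--     values = list(set(node2value.values()))
--     values_sorted = sorted(values, reverse=True)
--     value2ranking = dict()
--     ranking = 0
--     for v in values_sorted:
--         value2ranking[v] = ranking
--         ranking += 1
--
--     node2ranking = dict()
--     for k,v in node2value.items():
--         node2ranking[k] = {"ranking": value2ranking[v]}
--
--     return node2ranking
-- ===== SOURCE B (Python) =====
-- def rank_nodes_with_value(node2value):
--     # Dense rank of a node = number of distinct values strictly greater than its value.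
--     distinct = set(node2value.values())
--     node2ranking = {}
--     for k, v in node2value.items():
--         node2ranking[k] = {"ranking": sum(1 for u in distinct if u > v)}
--     return node2ranking
-- ===== Notes on version B (the rewrite author's own statement) =====
-- stated objective: simpler
-- what changed: B drops the sort and the value->rank table entirely: a node's dense rank is computed directly as the count of distinct values strictly greater than its own, in one loop over the items.
import Mathlib
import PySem

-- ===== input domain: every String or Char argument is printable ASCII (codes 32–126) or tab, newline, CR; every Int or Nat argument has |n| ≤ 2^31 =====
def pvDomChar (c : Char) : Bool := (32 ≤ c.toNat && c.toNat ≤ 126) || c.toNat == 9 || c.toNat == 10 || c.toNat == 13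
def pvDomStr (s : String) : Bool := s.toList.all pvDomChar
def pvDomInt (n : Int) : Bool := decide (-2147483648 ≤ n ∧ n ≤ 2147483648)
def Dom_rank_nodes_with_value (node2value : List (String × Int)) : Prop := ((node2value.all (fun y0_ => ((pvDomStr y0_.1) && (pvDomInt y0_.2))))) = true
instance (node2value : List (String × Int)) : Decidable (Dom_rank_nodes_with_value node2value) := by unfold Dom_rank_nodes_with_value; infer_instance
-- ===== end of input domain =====

-- B replaces A's sort + value->rank table by directly counting, per node, the distinct values
-- strictly greater than its own (objective: simpler).

-- ===== PORT A =====
-- list(set(...)) is consumed only through sorted(·) with the identity key, so set order does not matter.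
def rank_nodes_with_value (node2value : List (String × Int)) : List (String × List (String × Int)) :=
  let values : List Int := PySem.Set.ofList (node2value.map (·.2))
  let values_sorted : List Int := PySem.List.sorted values (fun v => v) true
  -- value2ranking[v] = ranking; ranking += 1   (state: the dict and the counter)
  let vr : PySem.Dict Int Int × Int :=
    values_sorted.foldl (fun (p : PySem.Dict Int Int × Int) v => (p.1.insert v p.2, p.2 + 1))
      (PySem.Dict.empty, 0)
  -- value2ranking[v] can never raise KeyError here (every v of the loop is a key), so getD is exact
  let node2ranking : PySem.Dict String (List (String × Int)) :=
    node2value.foldl (fun d kv => d.insert kv.1 [("ranking", vr.1.getD kv.2 0)]) PySem.Dict.empty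
  node2ranking.items

-- ===== PORT B =====
def rank_nodes_with_value_alt (node2value : List (String × Int)) : List (String × List (String × Int)) :=
  let distinct : PySem.Set Int := PySem.Set.ofList (node2value.map (·.2))
  -- sum(1 for u in distinct if u > v) = countP (order-independent consumption of the set)
  let node2ranking : PySem.Dict String (List (String × Int)) :=
    node2value.foldl
      (fun d kv => d.insert kv.1 [("ranking", ((distinct.countP (fun u => decide (kv.2 < u)) : Nat) : Int))])
      PySem.Dict.empty
  node2ranking.items

-- ===== PRECONDITION & SPEC =====
def Spec_rank_nodes_with_value (node2value : List (String × Int)) (out : List (String × List (String × Int))) : Prop := out = rank_nodes_with_value_alt node2value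
instance (node2value : List (String × Int)) (out : List (String × List (String × Int))) : Decidable (Spec_rank_nodes_with_value node2value out) := by unfold Spec_rank_nodes_with_value; infer_instance

-- ===== CLAIM (what is proved, stated in full; the proofs are below) =====
def Claim_equal_rank_nodes_with_value : Prop := ∀ (node2value : List (String × Int)), Dom_rank_nodes_with_value node2value → Spec_rank_nodes_with_value node2value (rank_nodes_with_value node2value)

-- ===== LEMMAS AND PROOFS =====

-- If v is never a key of the loop, the ranking loop does not change its binding.
lemma rank_fold_getD_not_mem (l : List Int) (d : PySem.Dict Int Int) (r : Int) (v : Int)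
    (hv : v ∉ l) :
    (l.foldl (fun (p : PySem.Dict Int Int × Int) v => (p.1.insert v p.2, p.2 + 1)) (d, r)).1.getD v 0
      = d.getD v 0 := by
  induction l generalizing d r with
  | nil => rfl
  | cons a l ih =>
      simp only [List.foldl_cons]
      rw [ih _ _ (fun h => hv (List.mem_cons_of_mem _ h)),
        PySem.Dict.getD_insert_of_ne]
      exact fun h => hv (h ▸ List.mem_cons_self)

-- On a strictly descending list, the ranking loop assigns to v its index,
-- which equals the number of elements greater than v.
lemma rank_fold_getD (l : List Int) (d : PySem.Dict Int Int) (r : Int) (v : Int)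
    (hp : l.Pairwise (· > ·)) (hv : v ∈ l) :
    (l.foldl (fun (p : PySem.Dict Int Int × Int) v => (p.1.insert v p.2, p.2 + 1)) (d, r)).1.getD v 0
      = r + (l.countP (fun u => decide (v < u)) : Int) := by
  induction l generalizing d r with
  | nil => cases hv
  | cons a l ih =>
      rw [List.pairwise_cons] at hp
      simp only [List.foldl_cons]
      rcases List.mem_cons.mp hv with rfl | hvl
      · have hnot : v ∉ l := fun h => absurd (hp.1 v h) (lt_irrefl v)
        rw [rank_fold_getD_not_mem l _ _ _ hnot, PySem.Dict.getD_insert_self]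
        have hc : (v :: l).countP (fun u => decide (v < u)) = 0 := by
          rw [List.countP_eq_zero]
          intro u hu
          rcases List.mem_cons.mp hu with rfl | hul
          · simp
          · simpa using not_lt.mpr (le_of_lt (hp.1 u hul))
        rw [hc]; simp
      · have hva : v < a := hp.1 v hvl
        rw [ih _ _ hp.2 hvl, List.countP_cons]
        simp only [hva, decide_true]
        push_cast; ring

-- The rank A looks up equals B's count of greater distinct values.
lemma rank_eq_count (values : List Int) (v : Int) (hv : v ∈ values) (hnd : values.Nodup) :
    ((PySem.List.sorted values (fun v => v) true).foldl
        (fun (p : PySem.Dict Int Int × Int) v => (p.1.insert v p.2, p.2 + 1))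
        (PySem.Dict.empty, 0)).1.getD v 0
      = ((values.countP (fun u => decide (v < u)) : Nat) : Int) := by
  have hperm : (PySem.List.sorted values (fun v => v) true).Perm values :=
    PySem.List.sorted_perm values _ true
  have hnd' : (PySem.List.sorted values (fun v => v) true).Nodup := hperm.nodup_iff.mpr hnd
  have hle : (PySem.List.sorted values (fun v => v) true).Pairwise (fun a b => b ≤ a) :=
    PySem.List.sorted_pairwise_rev values (fun v => v)
  have hgt : (PySem.List.sorted values (fun v => v) true).Pairwise (· > ·) :=
    (hnd'.and hle).imp (fun h => lt_of_le_of_ne h.2 (Ne.symm h.1))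
  rw [rank_fold_getD _ _ _ _ hgt (hperm.mem_iff.mpr hv), hperm.countP_eq]
  simp

-- ===== VERDICT (by name: the statement is the Claim_ definition above) =====
theorem rank_nodes_with_value_spec : Claim_equal_rank_nodes_with_value := by
  intro node2value _
  show rank_nodes_with_value node2value = rank_nodes_with_value_alt node2value
  unfold rank_nodes_with_value rank_nodes_with_value_alt
  dsimp only
  congr 1
  apply PySem.List.foldl_congr_mem
  intro d kv hkv
  congr 3
  exact rank_eq_count _ kv.2 ((PySem.Set.mem_ofList _ _).mpr (List.mem_map_of_mem hkv))
    (PySem.Set.nodup_ofList _)
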